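-- pv_equiv track=rewrite | github.com/Doodeyy/python-exercises | Number Converter.py | binToDecOrHexToDec
-- ===== SOURCE A (Python) =====
-- def binToDecOrHexToDec(number , choice):
--     hex = ["0","1", "2", "3", "4", "5", "6", "7", "8", "9", "A", "B", "C", "D", "E", "F"]
--     result = 0
--     if choice == 3:
--         for i in range(len(number)):
--             result = result * 2 + int(number[i])
--
--         return  result
--
--     elif choice == 4:
--         for i in range(len(number)):
--             item = number[i]
--             for j in range(len(hex)):
--                 if item == hex[j]:
--                     result = result * 16 + j
--
--         return result
-- ===== SOURCE B (Python) =====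
-- def binToDecOrHexToDec(number, choice):
--     if choice == 3:
--         values = [int(ch) for ch in number]
--         base = 2
--     elif choice == 4:
--         hexmap = {c: i for i, c in enumerate("0123456789ABCDEF")}
--         values = [hexmap[ch] for ch in number if ch in hexmap]
--         base = 16
--     else:
--         return None
--     return sum(v * base ** i for i, v in enumerate(reversed(values)))
-- ===== Notes on version B (the rewrite author's own statement) =====
-- stated objective: alternative
-- what changed: Replaces A's single-pass Horner accumulation (and its inner 16-way linear scan per hex char) with a build-then-weight decomposition: first map the string to a list of digit values (hex via a dict, skipping invalid chars), then sum v * base**i over the reversed value list.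
import Mathlib
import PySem

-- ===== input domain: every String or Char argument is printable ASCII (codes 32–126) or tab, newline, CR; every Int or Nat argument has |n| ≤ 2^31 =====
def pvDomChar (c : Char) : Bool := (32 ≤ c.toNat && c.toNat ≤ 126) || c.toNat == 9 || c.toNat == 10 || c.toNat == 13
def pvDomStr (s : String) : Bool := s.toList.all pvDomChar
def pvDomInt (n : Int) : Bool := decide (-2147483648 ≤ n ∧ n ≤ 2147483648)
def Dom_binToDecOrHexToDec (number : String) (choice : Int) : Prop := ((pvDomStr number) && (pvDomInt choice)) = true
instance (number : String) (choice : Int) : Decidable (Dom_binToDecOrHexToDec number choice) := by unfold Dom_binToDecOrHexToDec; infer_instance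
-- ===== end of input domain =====

-- B replaces A's Horner accumulation by a map-to-values pass followed by a
-- positional power sum; equivalence of the return values is proved on Pre_.

-- ===== PORT A =====
-- the hex digit list of A
def pvHexChars : List Char :=
  ['0', '1', '2', '3', '4', '5', '6', '7', '8', '9', 'A', 'B', 'C', 'D', 'E', 'F']

-- int(number[i]); Pre_ guarantees the char is an ASCII digit, so getD 0 is never taken
def pvIntOfChar (c : Char) : Int := (PySem.Int.ofStr? (String.ofList [c])).getD 0

def binToDecOrHexToDec (number : String) (choice : Int) : Option Int :=
  if choice = 3 then
    -- for i in range(len(number)): result = result * 2 + int(number[i])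
    some (number.toList.foldl (fun result c => result * 2 + pvIntOfChar c) 0)
  else if choice = 4 then
    -- nested loop: for each char, scan j over the 16 hex digits, update on match
    some (number.toList.foldl
      (fun result item =>
        (PySem.List.enumerate pvHexChars 0).foldl
          (fun result p => if item = p.2 then result * 16 + p.1 else result) result)
      0)
  else none

-- ===== PORT B =====
-- hexmap = {c: i for i, c in enumerate("0123456789ABCDEF")}
def pvHexMap : PySem.Dict Char Int :=
  PySem.Dict.ofList [('0', 0), ('1', 1), ('2', 2), ('3', 3), ('4', 4), ('5', 5),
                     ('6', 6), ('7', 7), ('8', 8), ('9', 9), ('A', 10), ('B', 11),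
                     ('C', 12), ('D', 13), ('E', 14), ('F', 15)]

-- sum(v * base**i for i, v in enumerate(reversed(values)))  (i ≥ 0, so .toNat is exact)
def pvPosSum (base : Int) (values : List Int) : Int :=
  (PySem.List.enumerate values.reverse 0).foldl (fun s p => s + p.2 * base ^ p.1.toNat) 0

def binToDecOrHexToDec_alt (number : String) (choice : Int) : Option Int :=
  if choice = 3 then
    some (pvPosSum 2 (number.toList.map pvIntOfChar))
  else if choice = 4 then
    some (pvPosSum 16 (number.toList.filterMap (fun c => pvHexMap.get? c)))
  else none

-- ===== PRECONDITION & SPEC =====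
-- Pre_ excludes exactly the inputs on which Python A raises ValueError:
-- choice 3 with a character that is not an ASCII digit (int(char) fails there).
def Pre_binToDecOrHexToDec (number : String) (choice : Int) : Prop :=
  choice = 3 → number.toList.all Char.isDigit = true
instance (number : String) (choice : Int) : Decidable (Pre_binToDecOrHexToDec number choice) := by unfold Pre_binToDecOrHexToDec; infer_instance

def pvWitness_binToDecOrHexToDec : String × Int := ("101", 3)

def Spec_binToDecOrHexToDec (number : String) (choice : Int) (out : Option Int) : Prop := out = binToDecOrHexToDec_alt number choice
instance (number : String) (choice : Int) (out : Option Int) : Decidable (Spec_binToDecOrHexToDec number choice out) := by unfold Spec_binToDecOrHexToDec; infer_instance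

-- ===== CLAIM (what is proved, stated in full; the proofs are below) =====
def Claim_equal_binToDecOrHexToDec : Prop := ∀ (number : String) (choice : Int), Dom_binToDecOrHexToDec number choice → Pre_binToDecOrHexToDec number choice → Spec_binToDecOrHexToDec number choice (binToDecOrHexToDec number choice)

-- ===== LEMMAS AND PROOFS =====

-- appending one value adds it with weight base^(length of the prefix)
lemma pvPosSum_cons (b v : Int) (vs : List Int) :
    pvPosSum b (v :: vs) = pvPosSum b vs + v * b ^ vs.length := by
  unfold pvPosSum
  rw [List.reverse_cons, PySem.List.enumerate_append, List.foldl_append]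
  simp [PySem.List.enumerate]

-- Horner accumulation = positional power sum over the values g keeps
lemma pvHorner_filterMap (b : Int) (g : Char → Option Int) (l : List Char) (a : Int) :
    l.foldl (fun r c => match g c with | some v => r * b + v | none => r) a
      = a * b ^ (l.filterMap g).length + pvPosSum b (l.filterMap g) := by
  induction l generalizing a with
  | nil => simp [pvPosSum]
  | cons c l ih =>
    cases hg : g c with
    | none => simp [hg, ih]
    | some v =>
      simp only [List.foldl_cons, hg, ih (a * b + v), List.filterMap_cons]
      rw [pvPosSum_cons]
      simp only [List.length_cons]
      ring

-- the dict comprehension, evaluated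
lemma pvHexMap_eq : pvHexMap = PySem.Dict.mk
    [('0', 0), ('1', 1), ('2', 2), ('3', 3), ('4', 4), ('5', 5), ('6', 6), ('7', 7),
     ('8', 8), ('9', 9), ('A', 10), ('B', 11), ('C', 12), ('D', 13), ('E', 14), ('F', 15)] := by
  decide

-- A's inner 16-way scan is the dict lookup (the 16 hex chars are distinct)
lemma pvInner_eq_lookup (r : Int) (c : Char) :
    (PySem.List.enumerate pvHexChars 0).foldl
        (fun result p => if c = p.2 then result * 16 + p.1 else result) r
      = match pvHexMap.get? c with | some j => r * 16 + j | none => r := by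
  by_cases h0 : c = '0'
  · subst h0; rw [show pvHexMap.get? '0' = some (0:Int) from by decide]
    simp [pvHexChars, PySem.List.enumerate]
  by_cases h1 : c = '1'
  · subst h1; rw [show pvHexMap.get? '1' = some (1:Int) from by decide]
    simp [pvHexChars, PySem.List.enumerate]
  by_cases h2 : c = '2'
  · subst h2; rw [show pvHexMap.get? '2' = some (2:Int) from by decide]
    simp [pvHexChars, PySem.List.enumerate]
  by_cases h3 : c = '3'
  · subst h3; rw [show pvHexMap.get? '3' = some (3:Int) from by decide]
    simp [pvHexChars, PySem.List.enumerate]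
  by_cases h4 : c = '4'
  · subst h4; rw [show pvHexMap.get? '4' = some (4:Int) from by decide]
    simp [pvHexChars, PySem.List.enumerate]
  by_cases h5 : c = '5'
  · subst h5; rw [show pvHexMap.get? '5' = some (5:Int) from by decide]
    simp [pvHexChars, PySem.List.enumerate]
  by_cases h6 : c = '6'
  · subst h6; rw [show pvHexMap.get? '6' = some (6:Int) from by decide]
    simp [pvHexChars, PySem.List.enumerate]
  by_cases h7 : c = '7'
  · subst h7; rw [show pvHexMap.get? '7' = some (7:Int) from by decide]
    simp [pvHexChars, PySem.List.enumerate]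
  by_cases h8 : c = '8'
  · subst h8; rw [show pvHexMap.get? '8' = some (8:Int) from by decide]
    simp [pvHexChars, PySem.List.enumerate]
  by_cases h9 : c = '9'
  · subst h9; rw [show pvHexMap.get? '9' = some (9:Int) from by decide]
    simp [pvHexChars, PySem.List.enumerate]
  by_cases hA : c = 'A'
  · subst hA; rw [show pvHexMap.get? 'A' = some (10:Int) from by decide]
    simp [pvHexChars, PySem.List.enumerate]
  by_cases hB : c = 'B'
  · subst hB; rw [show pvHexMap.get? 'B' = some (11:Int) from by decide]
    simp [pvHexChars, PySem.List.enumerate]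
  by_cases hC : c = 'C'
  · subst hC; rw [show pvHexMap.get? 'C' = some (12:Int) from by decide]
    simp [pvHexChars, PySem.List.enumerate]
  by_cases hD : c = 'D'
  · subst hD; rw [show pvHexMap.get? 'D' = some (13:Int) from by decide]
    simp [pvHexChars, PySem.List.enumerate]
  by_cases hE : c = 'E'
  · subst hE; rw [show pvHexMap.get? 'E' = some (14:Int) from by decide]
    simp [pvHexChars, PySem.List.enumerate]
  by_cases hF : c = 'F'
  · subst hF; rw [show pvHexMap.get? 'F' = some (15:Int) from by decide]
    simp [pvHexChars, PySem.List.enumerate]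
  simp [pvHexMap_eq, PySem.Dict.get?, pvHexChars, PySem.List.enumerate,
        h0, h1, h2, h3, h4, h5, h6, h7, h8, h9, hA, hB, hC, hD, hE, hF,
        Ne.symm h0, Ne.symm h1, Ne.symm h2, Ne.symm h3, Ne.symm h4, Ne.symm h5, Ne.symm h6, Ne.symm h7, Ne.symm h8, Ne.symm h9, Ne.symm hA, Ne.symm hB, Ne.symm hC, Ne.symm hD, Ne.symm hE, Ne.symm hF]

-- ===== VERDICT (by name: the statement is the Claim_ definition above) =====
theorem binToDecOrHexToDec_spec : Claim_equal_binToDecOrHexToDec := by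
  intro number choice _ _
  unfold Spec_binToDecOrHexToDec binToDecOrHexToDec binToDecOrHexToDec_alt
  by_cases h3 : choice = 3
  · simp only [h3, reduceIte]
    have h := pvHorner_filterMap 2 (fun c => some (pvIntOfChar c)) number.toList 0
    rw [show List.filterMap (fun c => some (pvIntOfChar c)) number.toList
          = number.toList.map pvIntOfChar from by simp] at h
    simp only [zero_mul, zero_add] at h
    exact congrArg some h
  · by_cases h4 : choice = 4
    · simp only [h4, reduceIte]
      have hfun : (fun (result : Int) (item : Char) =>
          (PySem.List.enumerate pvHexChars 0).foldl
            (fun result p => if item = p.2 then result * 16 + p.1 else result) result)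
          = fun r c => match pvHexMap.get? c with | some j => r * 16 + j | none => r := by
        funext r c; exact pvInner_eq_lookup r c
      rw [hfun]
      have h := pvHorner_filterMap 16 (fun c => pvHexMap.get? c) number.toList 0
      simp only [zero_mul, zero_add] at h
      exact congrArg some h
    · simp [h3, h4]
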